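-- pv_equiv track=rewrite | github.com/ZombieEggStew/test-3 | py/test.py | find_by_keywords
-- ===== SOURCE A (Python) =====
-- def find_by_keywords(props_rows, keywords):
--     """
--     在列名中查找包含任一关键词的列，返回匹配的 (index, name, value) 列表
--     """
--     res = []
--     low_keywords = [k.lower() for k in keywords]
--     for idx, name, val in props_rows:
--         if not name:
--             continue
--         lname = name.lower()
--         if any(kw in lname for kw in low_keywords):
--             res.append((idx, name, val))
--     return res
-- ===== SOURCE B (Python) =====
-- def find_by_keywords(props_rows, keywords):
--     """
--     Keyword-outer two-phase scan: lowercase every name once, then for each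
--     keyword mark the positions of rows whose (non-empty) lowered name contains
--     it, and finally emit the marked rows in their original order.
--     """
--     lnames = [name.lower() for _, name, _ in props_rows]
--     matched = set()
--     for kw in keywords:
--         lkw = kw.lower()
--         for pos, lname in enumerate(lnames):
--             if pos not in matched and lname and lkw in lname:
--                 matched.add(pos)
--     return [row for pos, row in enumerate(props_rows) if pos in matched]
-- ===== Notes on version B (the rewrite author's own statement) =====
-- stated objective: alternative
-- what changed: Inverted the loop nesting: B lowercases every name once up front, then scans the rows once per keyword accumulating a set of matched positions, and finally emits the rows whose position was marked, instead of A's single row pass testing every keyword per row.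
import Mathlib
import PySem

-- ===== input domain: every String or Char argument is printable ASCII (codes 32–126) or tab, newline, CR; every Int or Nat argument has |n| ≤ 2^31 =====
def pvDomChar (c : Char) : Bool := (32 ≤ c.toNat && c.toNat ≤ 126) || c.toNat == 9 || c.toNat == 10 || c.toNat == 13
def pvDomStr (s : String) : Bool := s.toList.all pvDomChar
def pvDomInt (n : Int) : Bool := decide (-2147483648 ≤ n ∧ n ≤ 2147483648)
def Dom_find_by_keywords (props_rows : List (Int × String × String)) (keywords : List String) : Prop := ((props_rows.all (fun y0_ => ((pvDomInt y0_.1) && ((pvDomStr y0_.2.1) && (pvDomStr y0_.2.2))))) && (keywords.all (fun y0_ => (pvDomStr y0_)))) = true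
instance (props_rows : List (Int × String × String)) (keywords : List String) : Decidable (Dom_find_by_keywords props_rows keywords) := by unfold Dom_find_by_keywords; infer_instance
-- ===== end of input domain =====

-- B inverts the loop nesting: names are lowercased once, then one scan of the rows per keyword
-- accumulates the set of matched positions, which finally selects the rows — an alternative
-- algorithm of the same asymptotic cost.

-- ===== PORT A =====
def find_by_keywords (props_rows : List (Int × String × String)) (keywords : List String) : List (Int × String × String) :=
  let low_keywords := keywords.map PySem.Str.lower
  props_rows.foldl (fun res r =>
    if r.2.1 = "" then res
    else
      let lname := PySem.Str.lower r.2.1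
      if low_keywords.any (fun kw => PySem.Str.isIn kw lname) then res ++ [r] else res) []

-- ===== PORT B =====
def find_by_keywords_alt (props_rows : List (Int × String × String)) (keywords : List String) : List (Int × String × String) :=
  let lnames := props_rows.map (fun r => PySem.Str.lower r.2.1)
  let matched : PySem.Set Int := keywords.foldl (fun m kw =>
    let lkw := PySem.Str.lower kw
    (PySem.List.enumerate lnames).foldl (fun m pr =>
      if pr.1 ∉ m ∧ pr.2 ≠ "" ∧ PySem.Str.isIn lkw pr.2 = true
      then PySem.Set.add m pr.1 else m) m) PySem.Set.empty
  ((PySem.List.enumerate props_rows).filter (fun pr => pr.1 ∈ matched)).map (·.2)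

-- ===== PRECONDITION & SPEC =====
def Spec_find_by_keywords (props_rows : List (Int × String × String)) (keywords : List String) (out : List (Int × String × String)) : Prop := out = find_by_keywords_alt props_rows keywords
instance (props_rows : List (Int × String × String)) (keywords : List String) (out : List (Int × String × String)) : Decidable (Spec_find_by_keywords props_rows keywords out) := by unfold Spec_find_by_keywords; infer_instance

-- ===== CLAIM (what is proved, stated in full; the proofs are below) =====
def Claim_equal_find_by_keywords : Prop := ∀ (props_rows : List (Int × String × String)) (keywords : List String), Dom_find_by_keywords props_rows keywords → Spec_find_by_keywords props_rows keywords (find_by_keywords props_rows keywords)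

-- ===== LEMMAS AND PROOFS =====

-- the common row predicate: non-empty name containing some lowercased keyword
def pvMatch (keywords : List String) (r : Int × String × String) : Bool :=
  !(r.2.1 = "") && keywords.any (fun kw => PySem.Str.isIn (PySem.Str.lower kw) (PySem.Str.lower r.2.1))

theorem find_by_keywords_eq_filter (props_rows : List (Int × String × String)) (keywords : List String) :
    find_by_keywords props_rows keywords = props_rows.filter (pvMatch keywords) := by
  unfold find_by_keywords
  have h : ∀ (res : List (Int × String × String)) (r : Int × String × String),
      (if r.2.1 = "" then res
       else if (keywords.map PySem.Str.lower).any (fun kw => PySem.Str.isIn kw (PySem.Str.lower r.2.1)) then res ++ [r] else res)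
      = if pvMatch keywords r then res ++ [r] else res := by
    intro res r
    simp only [pvMatch, List.any_map]
    by_cases h1 : r.2.1 = "" <;> simp [h1]
  simp only [h]
  exact PySem.List.foldl_append_if_eq_filter _ _ _

theorem lower_empty_iff (s : String) : PySem.Str.lower s = "" ↔ s = "" := by
  constructor
  · intro h
    have := congrArg String.toList h
    simp only [PySem.Str.toList_lower] at this
    simpa [PySem.Chars.lower] using this
  · intro h; subst h; rfl

-- inner fold over the enumerated lowered names: membership characterisation
theorem mem_inner_fold (kw : String) (pairs : List (Int × String)) (m : PySem.Set Int) (x : Int) :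
    x ∈ pairs.foldl (fun m pr =>
      if pr.1 ∉ m ∧ pr.2 ≠ "" ∧ PySem.Str.isIn kw pr.2 = true
      then PySem.Set.add m pr.1 else m) m
    ↔ x ∈ m ∨ ∃ pr ∈ pairs, pr.1 = x ∧ pr.2 ≠ "" ∧ PySem.Str.isIn kw pr.2 = true := by
  induction pairs generalizing m with
  | nil => simp
  | cons p ps ih =>
    simp only [List.foldl_cons]
    split
    · rw [ih]
      simp only [PySem.Set.mem_add, List.mem_cons]
      constructor
      · rintro (⟨h | h⟩ | h)
        · exact Or.inl h
        · rename_i hg; exact Or.inr ⟨p, Or.inl rfl, h.symm, hg.2⟩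
        · obtain ⟨pr, hpr, h2⟩ := h; exact Or.inr ⟨pr, Or.inr hpr, h2⟩
      · rintro (h | ⟨pr, hpr | hpr, h2⟩)
        · exact Or.inl (Or.inl h)
        · exact Or.inl (Or.inr (hpr ▸ h2.1.symm))
        · exact Or.inr ⟨pr, hpr, h2⟩
    · rw [ih]
      rename_i hg
      simp only [List.mem_cons]
      constructor
      · rintro (h | ⟨pr, hpr, h2⟩)
        · exact Or.inl h
        · exact Or.inr ⟨pr, Or.inr hpr, h2⟩
      · rintro (h | ⟨pr, hpr | hpr, h2⟩)
        · exact Or.inl h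
        · -- the guard failed: either p.1 was already in m, or the condition is false
          subst hpr
          by_cases hm : pr.1 ∈ m
          · exact Or.inl (h2.1 ▸ hm)
          · exact absurd ⟨hm, h2.2⟩ hg
        · exact Or.inr ⟨pr, hpr, h2⟩

-- outer fold over the keywords: membership characterisation
theorem mem_outer_fold (keywords : List String) (pairs : List (Int × String)) (m : PySem.Set Int) (x : Int) :
    x ∈ keywords.foldl (fun m kw =>
      (pairs.foldl (fun m pr =>
        if pr.1 ∉ m ∧ pr.2 ≠ "" ∧ PySem.Str.isIn (PySem.Str.lower kw) pr.2 = true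
        then PySem.Set.add m pr.1 else m) m)) m
    ↔ x ∈ m ∨ ∃ kw ∈ keywords, ∃ pr ∈ pairs, pr.1 = x ∧ pr.2 ≠ "" ∧ PySem.Str.isIn (PySem.Str.lower kw) pr.2 = true := by
  induction keywords generalizing m with
  | nil => simp
  | cons k ks ih =>
    simp only [List.foldl_cons, ih, mem_inner_fold, List.mem_cons]
    constructor
    · rintro (⟨h | h⟩ | ⟨kw, hkw, h⟩)
      · exact Or.inl h
      · exact Or.inr ⟨k, Or.inl rfl, h⟩
      · exact Or.inr ⟨kw, Or.inr hkw, h⟩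
    · rintro (h | ⟨kw, hkw | hkw, h⟩)
      · exact Or.inl (Or.inl h)
      · exact Or.inl (Or.inr (hkw ▸ h))
      · exact Or.inr ⟨kw, hkw, h⟩

-- filtering the enumeration by a predicate on the row, then dropping the index, is filtering the rows
theorem filter_enumerate_map_snd {α : Type} (xs : List α) (q : α → Bool) (s : Int) :
    ((PySem.List.enumerate xs s).filter (fun pr => q pr.2)).map (·.2) = xs.filter q := by
  induction xs generalizing s with
  | nil => simp [PySem.List.enumerate_nil]
  | cons x xs ih =>
    rw [PySem.List.enumerate_cons]
    by_cases h : q x <;> simp [h, ih]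

set_option maxHeartbeats 1000000 in
theorem find_by_keywords_alt_eq_filter (props_rows : List (Int × String × String)) (keywords : List String) :
    find_by_keywords_alt props_rows keywords = props_rows.filter (pvMatch keywords) := by
  unfold find_by_keywords_alt
  simp only []
  rw [← filter_enumerate_map_snd props_rows (pvMatch keywords) 0]
  congr 1
  apply List.filter_congr
  intro pr hpr
  rw [PySem.List.mem_enumerate_iff] at hpr
  obtain ⟨k, hk, rfl⟩ := hpr
  rw [Bool.eq_iff_iff]
  simp only [decide_eq_true_eq]
  rw [mem_outer_fold]
  simp only [PySem.Set.empty, List.not_mem_nil, false_or]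
  constructor
  · rintro ⟨kw, hkw, pr', hpr', hfst, hname, hsub⟩
    rw [PySem.List.mem_enumerate_iff] at hpr'
    obtain ⟨k', hk', rfl⟩ := hpr'
    have hkk : k' = k := by omega
    subst hkk
    simp only [List.getElem_map] at hname hsub
    simp only [pvMatch, Bool.and_eq_true, List.any_eq_true, Bool.not_eq_true', decide_eq_false_iff_not]
    exact ⟨fun he => hname ((lower_empty_iff _).mpr he), kw, hkw, hsub⟩
  · intro h
    simp only [pvMatch, Bool.and_eq_true, List.any_eq_true, Bool.not_eq_true',
      decide_eq_false_iff_not] at h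
    obtain ⟨hname, kw, hkw, hsub⟩ := h
    have hk' : k < (props_rows.map (fun r => PySem.Str.lower r.2.1)).length := by simpa using hk
    refine ⟨kw, hkw, ((0 : Int) + k, (props_rows.map (fun r => PySem.Str.lower r.2.1))[k]),
      by rw [PySem.List.mem_enumerate_iff]; exact ⟨k, hk', rfl⟩, rfl, ?_, ?_⟩
    · simp only [List.getElem_map]
      exact fun he => hname ((lower_empty_iff _).mp he)
    · simp only [List.getElem_map]
      exact hsub

-- ===== VERDICT (by name: the statement is the Claim_ definition above) =====
theorem find_by_keywords_spec : Claim_equal_find_by_keywords := by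
  intro props_rows keywords _
  unfold Spec_find_by_keywords
  rw [find_by_keywords_eq_filter, find_by_keywords_alt_eq_filter]
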